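-- pv_equiv track=rewrite | github.com/mooddood235/PrettyCarnap | PrettyCarnap.py | FixRuleNumbers
-- ===== SOURCE A (Python) =====
-- def FixRuleNumbers(rule, transfered):
--     rule = rule.removeprefix(':').replace(' ', '')
--     tokens = rule.split(',')
--
--     index_of_first_digit = IndexOfFirstDigit(tokens[0])
--     rule_name = tokens[0]
--     numbers = ['']
--
--     if index_of_first_digit:
--         rule_name = tokens[0][:IndexOfFirstDigit(tokens[0])]
--         numbers = [tokens[0][IndexOfFirstDigit(tokens[0]):]] + tokens[1:]
--
--         for i in range(len(numbers)):
--             numbers[i] = int(numbers[i])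
--
--             for (frm, to) in transfered:
--                 if numbers[i] == frm:
--                     numbers[i] = to
--                     break
--             n = numbers[i]
--             for (frm, to) in transfered:
--                 if n >= frm:
--                     numbers[i] -= 1
--
--     pretty_rule = ':{} {}'.format(rule_name, numbers[0])
--     for n in numbers[1:]:
--         pretty_rule += ',{}'.format(n)
--
--     return pretty_rule
--
-- def IndexOfFirstDigit(s):
--     for i in range(len(s)):
--         if s[i].isdigit():
--             return i
--     return None
-- ===== SOURCE B (Python) =====
-- def FixRuleNumbers(rule, transfered):
--     rule = rule.removeprefix(':').replace(' ', '')
--     tokens = rule.split(',')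
--     head = tokens[0]
--     idx = next((i for i, c in enumerate(head) if c.isdigit()), None)
--     if not idx:
--         return ':{} '.format(head)
--     remap = {}
--     for frm, to in transfered:
--         if frm not in remap:
--             remap[frm] = to
--     frms = sorted(frm for frm, _ in transfered)
--     out = []
--     for tok in [head[idx:]] + tokens[1:]:
--         m = int(tok)
--         m = remap.get(m, m)
--         out.append(str(m - _bisect_right(frms, m)))
--     return ':{} {}'.format(head[:idx], ','.join(out))
--
--
-- def _bisect_right(a, x):
--     lo, hi = 0, len(a)
--     while lo < hi:
--         mid = (lo + hi) // 2
--         if x < a[mid]: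
--             hi = mid
--         else:
--             lo = mid + 1
--     return lo
-- ===== Notes on version B (the rewrite author's own statement) =====
-- stated objective: alternative
-- what changed: A rescans the whole transfered list twice for every number token (first-match remap loop plus a decrement-count loop); B instead builds a first-wins dict once for the exact remap and a sorted list of the source lines once, answering each decrement count by binary search; it trades A's repeated linear scans for one-time index structures.
import Mathlib
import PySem

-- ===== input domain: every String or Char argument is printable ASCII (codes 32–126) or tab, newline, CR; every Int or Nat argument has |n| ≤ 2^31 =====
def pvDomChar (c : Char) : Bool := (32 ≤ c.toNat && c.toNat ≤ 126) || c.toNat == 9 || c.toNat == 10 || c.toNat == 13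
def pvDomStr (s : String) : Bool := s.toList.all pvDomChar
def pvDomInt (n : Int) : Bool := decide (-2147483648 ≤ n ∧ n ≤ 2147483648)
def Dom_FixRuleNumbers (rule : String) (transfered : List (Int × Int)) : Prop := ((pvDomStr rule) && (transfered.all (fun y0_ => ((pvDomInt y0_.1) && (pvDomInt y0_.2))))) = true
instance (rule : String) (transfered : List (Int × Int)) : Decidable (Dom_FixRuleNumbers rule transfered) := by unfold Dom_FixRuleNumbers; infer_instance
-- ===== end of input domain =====

-- B replaces A's per-number linear scans over `transfered` by a first-wins dict for the exact
-- remap and a sorted source list queried by binary search for the decrement count (an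
-- alternative algorithm, not measured faster); return values agree wherever A returns.

-- ===== PORT A =====
-- rule.removeprefix(':'), exact for the 1-char prefix
def pvStripColonA (cs : List Char) : List Char :=
  match cs with | ':' :: t => t | _ => cs

-- IndexOfFirstDigit: 'for i in range(len(s)): if s[i].isdigit(): return i / return None'
def pvIdxFirstDigitA (cs : List Char) (i : Int) : Option Int :=
  match cs with
  | [] => none
  | c :: rest => if PySem.Chars.isdigit c then some i else pvIdxFirstDigitA rest (i + 1)

-- the inner 'for (frm, to) in transfered: if numbers[i] == frm: numbers[i] = to; break'
def pvRemapA (transfered : List (Int × Int)) (n : Int) : Int :=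
  match transfered with
  | [] => n
  | p :: rest => if n = p.1 then p.2 else pvRemapA rest n

-- body of A's 'for i in range(len(numbers))' iteration (each index is independent)
def pvNumA (transfered : List (Int × Int)) (tok : List Char) : Int :=
  transfered.foldl
    (fun acc p => if pvRemapA transfered ((PySem.Int.ofChars? tok).getD 0) ≥ p.1 then acc - 1 else acc)
    (pvRemapA transfered ((PySem.Int.ofChars? tok).getD 0))
  -- int(tok) is (PySem.Int.ofChars? tok).getD 0; Pre_ excludes the ValueError inputs

def FixRuleNumbers (rule : String) (transfered : List (Int × Int)) : String :=
  let cs1 := pvStripColonA rule.toList                   -- rule.removeprefix(':')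
  let cs := PySem.Chars.replace cs1 [' '] []             -- .replace(' ', '')
  let tokens := PySem.Chars.splitOn cs [',']             -- rule.split(',')
  let t0 := tokens.headD []                              -- tokens[0] (split is never empty)
  match pvIdxFirstDigitA t0 0 with
  | some i =>
    if i ≠ 0 then                                        -- 'if index_of_first_digit:' (0 is falsy)
      let rule_name := PySem.List.slice t0 none (some i)
      let numbers := (PySem.List.slice t0 (some i) none :: tokens.tail).map (pvNumA transfered)
      match numbers with
      | [] => ""                                         -- unreachable: numbers is a cons
      | n :: rest =>
        String.ofList (rest.foldl (fun acc m => acc ++ ',' :: PySem.Int.toChars m)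
          (':' :: rule_name ++ ' ' :: PySem.Int.toChars n))
    else String.ofList (':' :: t0 ++ ' ' :: [])          -- ':{} {}'.format(tokens[0], '')
  | none => String.ofList (':' :: t0 ++ ' ' :: [])

-- ===== PORT B =====
-- rule.removeprefix(':')
def pvStripColonB (cs : List Char) : List Char :=
  match cs with | ':' :: t => t | _ => cs

-- first-wins remap dict: 'for frm, to in transfered: if frm not in remap: remap[frm] = to'
def pvBuildRemapB (transfered : List (Int × Int)) : PySem.Dict Int Int :=
  transfered.foldl (fun d p => if d.contains p.1 then d else d.insert p.1 p.2) PySem.Dict.empty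

-- body of B's output loop: str(remapped - bisect_right(frms, remapped))
def pvNumB (remap : PySem.Dict Int Int) (frms : List Int) (tok : List Char) : List Char :=
  PySem.Int.toChars
    (remap.getD ((PySem.Int.ofChars? tok).getD 0) ((PySem.Int.ofChars? tok).getD 0) -
      (PySem.List.bisectRight frms
        (remap.getD ((PySem.Int.ofChars? tok).getD 0) ((PySem.Int.ofChars? tok).getD 0)) : Int))
  -- _bisect_right in Source B is the CPython lo/hi loop = PySem.List.bisectRight

def FixRuleNumbers_alt (rule : String) (transfered : List (Int × Int)) : String :=
  let cs1 := pvStripColonB rule.toList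
  let cs := PySem.Chars.replace cs1 [' '] []
  let tokens := PySem.Chars.splitOn cs [',']
  let head := tokens.headD []
  match List.findIdx? PySem.Chars.isdigit head with      -- next((i for i,c in enumerate(head) if c.isdigit()), None)
  | none => String.ofList (':' :: head ++ ' ' :: [])
  | some i =>
    if i = 0 then String.ofList (':' :: head ++ ' ' :: [])   -- 'if not idx:'
    else
      let remap := pvBuildRemapB transfered
      let frms := PySem.List.sorted (transfered.map Prod.fst) (fun x => x) false
      let out := (head.drop i :: tokens.tail).map (pvNumB remap frms)
      String.ofList (':' :: head.take i ++ ' ' :: PySem.Chars.join [','] out)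

-- ===== PRECONDITION & SPEC =====
-- Pre_ excludes exactly the inputs where A's int() raises ValueError: a renumbered token that
-- does not parse as a Python int (e.g. a trailing comma's empty token, or letters after the digits).
def pvStripColonPre (cs : List Char) : List Char :=
  match cs with | ':' :: t => t | _ => cs

def Pre_FixRuleNumbers (rule : String) (transfered : List (Int × Int)) : Prop :=
  let cs1 := pvStripColonPre rule.toList
  let cs := PySem.Chars.replace cs1 [' '] []
  let tokens := PySem.Chars.splitOn cs [',']
  let head := tokens.headD []
  let idx := (List.findIdx? PySem.Chars.isdigit head).getD 0
  idx = 0 ∨ ∀ tok ∈ head.drop idx :: tokens.tail, (PySem.Int.ofChars? tok).isSome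
instance (rule : String) (transfered : List (Int × Int)) : Decidable (Pre_FixRuleNumbers rule transfered) := by unfold Pre_FixRuleNumbers; infer_instance

def pvWitness_FixRuleNumbers : String × (List (Int × Int)) := (":MP 1,2", [(1, 3)])

def Spec_FixRuleNumbers (rule : String) (transfered : List (Int × Int)) (out : String) : Prop := out = FixRuleNumbers_alt rule transfered
instance (rule : String) (transfered : List (Int × Int)) (out : String) : Decidable (Spec_FixRuleNumbers rule transfered out) := by unfold Spec_FixRuleNumbers; infer_instance

-- ===== CLAIM (what is proved, stated in full; the proofs are below) =====
def Claim_equal_FixRuleNumbers : Prop := ∀ (rule : String) (transfered : List (Int × Int)), Dom_FixRuleNumbers rule transfered → Pre_FixRuleNumbers rule transfered → Spec_FixRuleNumbers rule transfered (FixRuleNumbers rule transfered)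

-- ===== LEMMAS AND PROOFS =====

theorem pvStrip_BA (cs : List Char) : pvStripColonB cs = pvStripColonA cs := by
  cases cs with
  | nil => rfl
  | cons c t =>
    simp only [pvStripColonA, pvStripColonB]

-- A's digit scan is findIdx? with an offset
theorem pvIdxFirstDigitA_eq (cs : List Char) (i : Int) :
    pvIdxFirstDigitA cs i = (List.findIdx? PySem.Chars.isdigit cs).map (fun j => i + (j : Int)) := by
  induction cs generalizing i with
  | nil => rfl
  | cons c rest ih =>
    simp only [pvIdxFirstDigitA, List.findIdx?_cons]
    by_cases h : PySem.Chars.isdigit c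
    · simp [h]
    · simp only [h, ih (i + 1)]
      cases List.findIdx? PySem.Chars.isdigit rest <;> simp <;> omega

-- the decrement loop subtracts a countP
theorem pvDec_eq (tr : List (Int × Int)) (n : Int) (acc : Int) :
    tr.foldl (fun acc p => if n ≥ p.1 then acc - 1 else acc) acc
      = acc - (tr.countP (fun p => decide (p.1 ≤ n)) : Int) := by
  induction tr generalizing acc with
  | nil => simp
  | cons p rest ih =>
    simp only [List.foldl_cons, List.countP_cons, ih]
    by_cases h : p.1 ≤ n
    · simp [h, ge_iff_le]; ring
    · simp [h, ge_iff_le]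

-- countP of a prefix-closed predicate on a list equals the cut point
theorem countP_of_cut (p : Int → Bool) (a : List Int) (r : Nat) (hr : r ≤ a.length)
    (h : ∀ j (hj : j < a.length), p a[j] = true ↔ j < r) : a.countP p = r := by
  induction a generalizing r with
  | nil => simpa using (Nat.le_zero.mp hr).symm
  | cons x xs ih =>
    cases r with
    | zero =>
      have hx : p x = false := by
        have := h 0 (by simp)
        simp at this; simpa using this
      have hxs : xs.countP p = 0 := by
        apply ih 0 (Nat.zero_le _)
        intro j hj
        have := h (j + 1) (by simp; omega)
        simpa using this
      simp [hx, hxs]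
    | succ r' =>
      have hx : p x = true := by
        have := h 0 (by simp)
        simpa using this
      have hxs : xs.countP p = r' := by
        apply ih r' (by simpa using hr)
        intro j hj
        have := h (j + 1) (by simp; omega)
        simpa using this
      simp [hx, hxs]

-- bisect_right on a sorted list counts the elements ≤ x
theorem bisectRight_eq_countP (a : List Int) (x : Int)
    (hs : List.Pairwise (fun u v => u ≤ v) a) :
    (PySem.List.bisectRight a x : Nat) = a.countP (fun f => decide (f ≤ x)) := by
  obtain ⟨h1, h2, h3⟩ := PySem.List.bisectRight_spec a x hs
  refine (countP_of_cut _ a _ h1 ?_).symm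
  intro j hj
  constructor
  · intro hpj
    by_contra hge
    have := h3 j hj (by omega)
    simp at hpj; omega
  · intro hlt
    simpa using h2 j hj hlt

-- a key already present survives the first-wins build loop
theorem buildRemap_getD_of_contains (tr : List (Int × Int)) (d : PySem.Dict Int Int)
    (k dflt : Int) (hk : d.contains k = true) :
    (tr.foldl (fun d p => if d.contains p.1 then d else d.insert p.1 p.2) d).getD k dflt
      = d.getD k dflt := by
  induction tr generalizing d with
  | nil => rfl
  | cons p rest ih =>
    simp only [List.foldl_cons]
    by_cases hc : d.contains p.1 = true
    · rw [if_pos hc]; exact ih d hk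
    · rw [if_neg hc]
      have hne : k ≠ p.1 := by
        intro h; rw [h] at hk; exact hc hk
      rw [ih (d.insert p.1 p.2) (by rw [PySem.Dict.contains_insert]; simp [hk])]
      rw [PySem.Dict.getD_insert]
      simp [hne]

-- first-wins dict lookup is A's first-match scan
theorem buildRemap_getD_eq_remapA (tr : List (Int × Int)) (d : PySem.Dict Int Int)
    (k : Int) (hk : d.contains k = false) (hd : d.getD k k = k) :
    (tr.foldl (fun d p => if d.contains p.1 then d else d.insert p.1 p.2) d).getD k k
      = pvRemapA tr k := by
  induction tr generalizing d with
  | nil => simpa [pvRemapA] using hd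
  | cons p rest ih =>
    simp only [List.foldl_cons, pvRemapA]
    by_cases he : k = p.1
    · have hc : ¬ d.contains p.1 = true := by rw [← he]; simp [hk]
      rw [if_neg hc, if_pos he]
      rw [buildRemap_getD_of_contains rest _ k k (by rw [PySem.Dict.contains_insert, he]; simp)]
      rw [he, PySem.Dict.getD_insert_self]
    · rw [if_neg he]
      by_cases hc : d.contains p.1 = true
      · rw [if_pos hc]; exact ih d hk hd
      · rw [if_neg hc]
        apply ih
        · rw [PySem.Dict.contains_insert]; simp [hk, he]
        · rw [PySem.Dict.getD_insert]; simp [he, hd]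

-- per-token: B's dict + bisect value is A's two scans, rendered
theorem pvNumB_eq (tr : List (Int × Int)) (tok : List Char) :
    pvNumB (pvBuildRemapB tr) (PySem.List.sorted (tr.map Prod.fst) (fun x => x) false) tok
      = PySem.Int.toChars (pvNumA tr tok) := by
  simp only [pvNumB, pvNumA, pvBuildRemapB]
  rw [buildRemap_getD_eq_remapA tr PySem.Dict.empty _ (PySem.Dict.contains_empty _)
    (PySem.Dict.getD_empty _ _)]
  congr 1
  rw [pvDec_eq]
  congr 1
  rw [bisectRight_eq_countP _ _ (by simpa using PySem.List.sorted_pairwise (tr.map Prod.fst) (fun x => x))]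
  rw [(PySem.List.sorted_perm (tr.map Prod.fst) (fun x => x) false).countP_eq]
  rw [List.countP_map]
  rfl

theorem pvIdxFirstDigitA_zero (cs : List Char) :
    pvIdxFirstDigitA cs 0 = (List.findIdx? PySem.Chars.isdigit cs).map (fun j : Nat => (j : Int)) := by
  rw [pvIdxFirstDigitA_eq]
  cases List.findIdx? PySem.Chars.isdigit cs <;> simp

-- ','.join(out) with a leading element, as a flatMap
theorem join_comma_cons (x : List Char) (l : List (List Char)) :
    PySem.Chars.join [','] (x :: l) = x ++ l.flatMap (fun c => ',' :: c) := by
  induction l generalizing x with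
  | nil => simp [PySem.Chars.join_singleton]
  | cons y rest ih =>
    rw [PySem.Chars.join_cons_cons, ih y]
    simp

-- ===== VERDICT (by name: the statement is the Claim_ definition above) =====
theorem FixRuleNumbers_spec : Claim_equal_FixRuleNumbers := by
  intro rule transfered _dom _pre
  unfold Spec_FixRuleNumbers FixRuleNumbers FixRuleNumbers_alt
  simp only [pvIdxFirstDigitA_zero, pvStrip_BA]
  set t0 := (PySem.Chars.splitOn (PySem.Chars.replace
    (pvStripColonA rule.toList) [' '] []) [',']).headD [] with ht0
  set tl := (PySem.Chars.splitOn (PySem.Chars.replace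
    (pvStripColonA rule.toList) [' '] []) [',']).tail with htl
  cases hidx : List.findIdx? PySem.Chars.isdigit t0 with
  | none => simp
  | some j =>
    simp only [Option.map_some]
    by_cases hj : j = 0
    · subst hj; simp
    · rw [if_pos (show ((j : Nat) : Int) ≠ 0 by omega), if_neg hj]
      have hslice1 : PySem.List.slice t0 none (some ((j : Nat) : Int)) = t0.take j := by
        rw [PySem.List.slice_to t0 (by omega)]
        simp
      have hslice2 : PySem.List.slice t0 (some ((j : Nat) : Int)) none = t0.drop j := by
        rw [PySem.List.slice_from t0 (by omega)]
        simp
      rw [hslice1, hslice2]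
      simp only [List.map_cons]
      rw [PySem.List.foldl_append_eq_flatMap, join_comma_cons]
      simp only [pvNumB_eq, List.flatMap_map]
      simp [List.append_assoc]
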